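-- pv_equiv track=rewrite | github.com/keithallatt/krass-lang | parseKrass.py | compile_krass_conditional
-- ===== SOURCE A (Python) =====
-- def compile_krass_conditional(krass_conditional):
-- 	"""
-- 	Compile Krass conditional statements to Python conditional statements.
-- 	"""
-- 	# change true to True, && to and etc.
-- 	changes = [
-- 		("true", "True"),
-- 		("false", "False"),
-- 		("&&", " and "),
-- 		("||", " or "),  # keep an eye on this one, for regex or non
-- 		("!", " not ")
-- 	]
--
-- 	for change in changes:
-- 		krass_conditional = krass_conditional.replace(change[0], change[1])
--
-- 	return krass_conditional
-- ===== SOURCE B (Python) =====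
-- def compile_krass_conditional(krass_conditional):
-- 	"""
-- 	Compile Krass conditional statements to Python conditional statements.
--
-- 	Single left-to-right scan: at each position the first matching token from
-- 	the table is replaced; otherwise the character is copied.  One pass instead
-- 	of five sequential full-string replace passes (no replacement output can
-- 	feed a later pass, so the result is identical).
-- 	"""
-- 	table = [
-- 		("true", "True"),
-- 		("false", "False"),
-- 		("&&", " and "),
-- 		("||", " or "),
-- 		("!", " not ")
-- 	]
-- 	out = []
-- 	i = 0
-- 	s = krass_conditional
-- 	n = len(s)
-- 	while i < n:
-- 		for tok, rep in table:
-- 			if s.startswith(tok, i):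
-- 				out.append(rep)
-- 				i += len(tok)
-- 				break
-- 		else:
-- 			out.append(s[i])
-- 			i += 1
-- 	return "".join(out)
-- ===== Notes on version B (the rewrite author's own statement) =====
-- stated objective: alternative
-- what changed: Replaced five sequential full-string str.replace passes with a single left-to-right scan that consults a token table at each position (safe because no replacement text can create a token for a later pass).
import Mathlib
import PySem

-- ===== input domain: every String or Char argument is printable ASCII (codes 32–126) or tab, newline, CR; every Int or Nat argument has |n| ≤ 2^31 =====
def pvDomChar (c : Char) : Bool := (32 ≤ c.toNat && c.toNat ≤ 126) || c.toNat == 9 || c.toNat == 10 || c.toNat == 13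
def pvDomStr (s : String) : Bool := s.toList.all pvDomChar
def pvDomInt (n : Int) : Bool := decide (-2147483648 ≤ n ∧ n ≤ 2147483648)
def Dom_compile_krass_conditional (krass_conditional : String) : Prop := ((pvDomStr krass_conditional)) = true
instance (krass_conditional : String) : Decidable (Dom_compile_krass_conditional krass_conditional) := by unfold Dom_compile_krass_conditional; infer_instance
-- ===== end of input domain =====

-- B replaces A's five sequential full-string replace passes with a single
-- left-to-right table-driven scan (alternative decomposition, same result).


-- ===== PORT A =====
-- literal port of A: fold the list of (old, new) changes over the string,
-- applying Python's str.replace (PySem.Str.replace) for each pair in order.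
def compile_krass_conditional (krass_conditional : String) : String :=
  let changes : List (String × String) :=
    [("true", "True"), ("false", "False"), ("&&", " and "), ("||", " or "), ("!", " not ")]
  changes.foldl (fun acc change => PySem.Str.replace acc change.1 change.2) krass_conditional

-- ===== PORT B =====
-- literal port of B: one pass over the characters; at each position the first
-- matching token of the table (checked with startswith = isPrefixOf, in table
-- order) is replaced, otherwise the character is copied.
def pvScanB : List Char → List Char
  | [] => []
  | c :: t =>
    if ['t','r','u','e'].isPrefixOf (c :: t) then
      ['T','r','u','e'] ++ pvScanB (List.drop 3 t)
    else if ['f','a','l','s','e'].isPrefixOf (c :: t) then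
      ['F','a','l','s','e'] ++ pvScanB (List.drop 4 t)
    else if ['&','&'].isPrefixOf (c :: t) then
      [' ','a','n','d',' '] ++ pvScanB (List.drop 1 t)
    else if ['|','|'].isPrefixOf (c :: t) then
      [' ','o','r',' '] ++ pvScanB (List.drop 1 t)
    else if ['!'].isPrefixOf (c :: t) then
      [' ','n','o','t',' '] ++ pvScanB t
    else
      c :: pvScanB t
termination_by l => l.length
decreasing_by
  all_goals simp [List.length_drop]

def compile_krass_conditional_alt (krass_conditional : String) : String :=
  String.ofList (pvScanB krass_conditional.toList)

-- ===== PRECONDITION & SPEC =====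
def Spec_compile_krass_conditional (krass_conditional : String) (out : String) : Prop := out = compile_krass_conditional_alt krass_conditional
instance (krass_conditional : String) (out : String) : Decidable (Spec_compile_krass_conditional krass_conditional out) := by unfold Spec_compile_krass_conditional; infer_instance

-- ===== CLAIM (what is proved, stated in full; the proofs are below) =====
def Claim_equal_compile_krass_conditional : Prop := ∀ (krass_conditional : String), Dom_compile_krass_conditional krass_conditional → Spec_compile_krass_conditional krass_conditional (compile_krass_conditional krass_conditional)

-- ===== LEMMAS AND PROOFS =====

-- a simple structural-recursion form of Python's str.replace (for old ≠ [])
def pvRepl (old new : List Char) : List Char → List Char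
  | [] => []
  | c :: t =>
    if old.isPrefixOf (c :: t) then new ++ pvRepl old new (List.drop (old.length - 1) t)
    else c :: pvRepl old new t
termination_by l => l.length
decreasing_by
  all_goals simp [List.length_drop]

theorem pvGo_eq_repl (old new : List Char) (hold : old ≠ []) :
    ∀ (fuel : Nat) (l acc : List Char), l.length ≤ fuel →
      PySem.Chars.replace.go old new fuel l acc = acc.reverse ++ pvRepl old new l := by
  have holdlen : 1 ≤ old.length := by cases old <;> simp_all
  intro fuel
  induction fuel with
  | zero =>
    intro l acc hl
    have : l = [] := by cases l <;> simp_all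
    subst this
    simp [PySem.Chars.replace.go, pvRepl]
  | succ fuel ih =>
    intro l acc hl
    cases l with
    | nil => simp [PySem.Chars.replace.go, pvRepl]
    | cons c t =>
      rw [show PySem.Chars.replace.go old new (fuel+1) (c::t) acc =
        (if old.isPrefixOf (c::t) = true then
          PySem.Chars.replace.go old new fuel (List.drop old.length (c::t)) (new.reverse ++ acc)
        else PySem.Chars.replace.go old new fuel t (c :: acc)) from by
          simp [PySem.Chars.replace.go]]
      by_cases h : old.isPrefixOf (c::t) = true
      · simp only [h, if_pos]
        rw [ih _ _ (by simp [List.length_drop] at *; omega)]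
        have hdrop : List.drop old.length (c::t) = List.drop (old.length - 1) t := by
          obtain ⟨k, hk⟩ : ∃ k, old.length = k + 1 := by
            cases old with
            | nil => exact absurd rfl hold
            | cons a b => exact ⟨b.length, rfl⟩
          simp [hk]
        rw [hdrop]
        have : pvRepl old new (c::t) = new ++ pvRepl old new (List.drop (old.length - 1) t) := by
          rw [pvRepl]; simp [h]
        rw [this]; simp
      · simp only [h, if_neg, Bool.false_eq_true, not_false_iff, if_neg]
        rw [ih _ _ (by simp at hl ⊢; omega)]
        have : pvRepl old new (c::t) = c :: pvRepl old new t := by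
          rw [pvRepl]; simp [h]
        rw [this]; simp

theorem pvReplace_eq_repl (old new s : List Char) (hold : old ≠ []) :
    PySem.Chars.replace s old new = pvRepl old new s := by
  rw [PySem.Chars.replace]
  have : old.isEmpty = false := by cases old <;> simp_all
  rw [this]
  simpa using pvGo_eq_repl old new hold s.length s [] (le_refl _)

-- head of a pvRepl result is the head of the input or the head of `new`
theorem pvRepl_head? (old new : List Char) (hnew : new ≠ []) (x : List Char) :
    (pvRepl old new x).head? = x.head? ∨ (pvRepl old new x).head? = new.head? := by
  cases x with
  | nil => left; simp [pvRepl]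
  | cons c t =>
    rw [pvRepl]
    by_cases h : old.isPrefixOf (c::t) = true
    · right; simp [h]; cases new <;> simp_all
    · left; simp [h]

-- a singleton prefix is exactly a statement about the head
theorem pvSingle_prefix (a : Char) (l : List Char) : [a] <+: l ↔ l.head? = some a := by
  cases l <;> simp [List.cons_prefix_cons, eq_comm]

-- inverting one step of pvRepl on a cons-prefix whose head is not new's head
theorem pvRepl_cons_inv (old new : List Char) (hnew : new ≠ []) {c : Char} {p x : List Char}
    (hc : new.head? ≠ some c) (h : c :: p <+: pvRepl old new x) :
    ∃ t, x = c :: t ∧ p <+: pvRepl old new t := by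
  cases x with
  | nil => simp [pvRepl] at h
  | cons d t =>
    rw [pvRepl] at h
    by_cases hm : old.isPrefixOf (d::t) = true
    · rw [if_pos hm] at h
      exfalso
      obtain ⟨u, hu⟩ := h
      have hh := congrArg List.head? hu
      cases new with
      | nil => exact hnew rfl
      | cons n0 ns =>
        simp at hh hc
        exact hc hh.symm
    · rw [if_neg hm] at h
      rw [List.cons_prefix_cons] at h
      exact ⟨t, by rw [h.1], h.2⟩

-- pass 1 (true→True) cannot create an occurrence of "alse"
theorem pvAlse_pres (x : List Char)
    (h : ['a','l','s','e'] <+: pvRepl ['t','r','u','e'] ['T','r','u','e'] x) :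
    ['a','l','s','e'] <+: x := by
  obtain ⟨t1, e1, hA⟩ := pvRepl_cons_inv _ _ (by decide) (by decide) h
  obtain ⟨t2, e2, hB⟩ := pvRepl_cons_inv _ _ (by decide) (by decide) hA
  obtain ⟨t3, e3, hC⟩ := pvRepl_cons_inv _ _ (by decide) (by decide) hB
  obtain ⟨t4, e4, _⟩ := pvRepl_cons_inv _ _ (by decide) (by decide) hC
  subst e1; subst e2; subst e3; subst e4
  exact ⟨t4, rfl⟩

-- abbreviations for the five passes
def pvR1 : List Char → List Char := pvRepl ['t','r','u','e'] ['T','r','u','e']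
def pvR2 : List Char → List Char := pvRepl ['f','a','l','s','e'] ['F','a','l','s','e']
def pvR3 : List Char → List Char := pvRepl ['&','&'] [' ','a','n','d',' ']
def pvR4 : List Char → List Char := pvRepl ['|','|'] [' ','o','r',' ']
def pvR5 : List Char → List Char := pvRepl ['!'] [' ','n','o','t',' ']

-- the head after passes 1–2 is the old head, or 'T'/'F'
theorem pvHead12 (y : List Char) :
    (pvR2 (pvR1 y)).head? = y.head? ∨ (pvR2 (pvR1 y)).head? = some 'T' ∨
      (pvR2 (pvR1 y)).head? = some 'F' := by
  rcases pvRepl_head? ['f','a','l','s','e'] ['F','a','l','s','e'] (by decide) (pvR1 y) with h | h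
  · rcases pvRepl_head? ['t','r','u','e'] ['T','r','u','e'] (by decide) y with h' | h'
    · left; rw [pvR2, pvR1] at *; rw [h, h']
    · right; left; rw [pvR2, pvR1] at *; rw [h, h']; rfl
  · right; right; rw [pvR2] at *; rw [h]; rfl

-- the head after passes 1–3 is the old head, or 'T'/'F'/' '
theorem pvHead123 (y : List Char) :
    (pvR3 (pvR2 (pvR1 y))).head? = y.head? ∨ (pvR3 (pvR2 (pvR1 y))).head? = some 'T' ∨
      (pvR3 (pvR2 (pvR1 y))).head? = some 'F' ∨ (pvR3 (pvR2 (pvR1 y))).head? = some ' ' := by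
  rcases pvRepl_head? ['&','&'] [' ','a','n','d',' '] (by decide) (pvR2 (pvR1 y)) with h | h
  · rcases pvHead12 y with h' | h' | h'
    · left; rw [pvR3] at *; rw [h, h']
    · right; left; rw [pvR3] at *; rw [h, h']
    · right; right; left; rw [pvR3] at *; rw [h, h']
  · right; right; right; rw [pvR3] at *; rw [h]; rfl

-- the five passes composed equal the single scan
theorem pvMainAux : ∀ (n : Nat) (x : List Char), x.length ≤ n →
    pvR5 (pvR4 (pvR3 (pvR2 (pvR1 x)))) = pvScanB x := by
  intro n
  induction n with
  | zero =>
    intro x hx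
    have : x = [] := by cases x <;> simp_all
    subst this
    simp [pvR1, pvR2, pvR3, pvR4, pvR5, pvRepl, pvScanB]
  | succ n ih =>
    intro x hx
    cases x with
    | nil => simp [pvR1, pvR2, pvR3, pvR4, pvR5, pvRepl, pvScanB]
    | cons c t =>
      simp only [List.length_cons] at hx
      by_cases h1 : ['t','r','u','e'].isPrefixOf (c::t) = true
      · obtain ⟨r, hr⟩ := (PySem.Chars.startswith_iff (c::t) ['t','r','u','e']).mp h1
        have hlen : r.length ≤ n := by
          have := congrArg List.length hr; simp at this; omega
        rw [← hr]
        simpa [pvR1, pvR2, pvR3, pvR4, pvR5, pvRepl, pvScanB, List.isPrefixOf] using ih r hlen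
      · by_cases h2 : ['f','a','l','s','e'].isPrefixOf (c::t) = true
        · obtain ⟨r, hr⟩ := (PySem.Chars.startswith_iff (c::t) ['f','a','l','s','e']).mp h2
          have hlen : r.length ≤ n := by
            have := congrArg List.length hr; simp at this; omega
          rw [← hr]
          simpa [pvR1, pvR2, pvR3, pvR4, pvR5, pvRepl, pvScanB, List.isPrefixOf] using ih r hlen
        · by_cases h3 : ['&','&'].isPrefixOf (c::t) = true
          · obtain ⟨r, hr⟩ := (PySem.Chars.startswith_iff (c::t) ['&','&']).mp h3
            have hlen : r.length ≤ n := by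
              have := congrArg List.length hr; simp at this; omega
            rw [← hr]
            simpa [pvR1, pvR2, pvR3, pvR4, pvR5, pvRepl, pvScanB, List.isPrefixOf] using ih r hlen
          · by_cases h4 : ['|','|'].isPrefixOf (c::t) = true
            · obtain ⟨r, hr⟩ := (PySem.Chars.startswith_iff (c::t) ['|','|']).mp h4
              have hlen : r.length ≤ n := by
                have := congrArg List.length hr; simp at this; omega
              rw [← hr]
              simpa [pvR1, pvR2, pvR3, pvR4, pvR5, pvRepl, pvScanB, List.isPrefixOf] using ih r hlen
            · by_cases h5 : ['!'].isPrefixOf (c::t) = true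
              · obtain ⟨r, hr⟩ := (PySem.Chars.startswith_iff (c::t) ['!']).mp h5
                have hlen : r.length ≤ n := by
                  have := congrArg List.length hr; simp at this; omega
                rw [← hr]
                simpa [pvR1, pvR2, pvR3, pvR4, pvR5, pvRepl, pvScanB, List.isPrefixOf] using ih r hlen
              · -- default: no token matches at this position; every pass copies c
                have hih := ih t (by omega)
                have hs : pvScanB (c::t) = c :: pvScanB t := by
                  rw [pvScanB]; simp [h1, h2, h3, h4, h5]
                have e1 : pvR1 (c::t) = c :: pvR1 t := by
                  rw [pvR1, pvRepl]; simp [h1]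
                have e2 : pvR2 (c :: pvR1 t) = c :: pvR2 (pvR1 t) := by
                  rw [pvR2, pvRepl]
                  rw [if_neg]
                  intro hm
                  obtain ⟨hc, hp⟩ := List.cons_prefix_cons.mp
                    ((PySem.Chars.startswith_iff _ _).mp hm)
                  subst hc
                  have h2' : ¬ (['a','l','s','e'] <+: t) := by
                    intro hal
                    exact h2 ((PySem.Chars.startswith_iff _ _).mpr
                      (List.cons_prefix_cons.mpr ⟨rfl, hal⟩))
                  exact h2' (pvAlse_pres t hp)
                have e3 : pvR3 (c :: pvR2 (pvR1 t)) = c :: pvR3 (pvR2 (pvR1 t)) := by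
                  rw [pvR3, pvRepl]
                  rw [if_neg]
                  intro hm
                  obtain ⟨hc, hp⟩ := List.cons_prefix_cons.mp
                    ((PySem.Chars.startswith_iff _ _).mp hm)
                  subst hc
                  have hhd : (pvR2 (pvR1 t)).head? = some '&' :=
                    (pvSingle_prefix '&' _).mp hp
                  have hth : t.head? ≠ some '&' := by
                    intro hh
                    exact h3 ((PySem.Chars.startswith_iff _ _).mpr
                      (List.cons_prefix_cons.mpr ⟨rfl, (pvSingle_prefix '&' t).mpr hh⟩))
                  rcases pvHead12 t with h' | h' | h' <;> rw [h'] at hhd <;> simp_all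
                have e4 : pvR4 (c :: pvR3 (pvR2 (pvR1 t))) = c :: pvR4 (pvR3 (pvR2 (pvR1 t))) := by
                  rw [pvR4, pvRepl]
                  rw [if_neg]
                  intro hm
                  obtain ⟨hc, hp⟩ := List.cons_prefix_cons.mp
                    ((PySem.Chars.startswith_iff _ _).mp hm)
                  subst hc
                  have hhd : (pvR3 (pvR2 (pvR1 t))).head? = some '|' :=
                    (pvSingle_prefix '|' _).mp hp
                  have hth : t.head? ≠ some '|' := by
                    intro hh
                    exact h4 ((PySem.Chars.startswith_iff _ _).mpr
                      (List.cons_prefix_cons.mpr ⟨rfl, (pvSingle_prefix '|' t).mpr hh⟩))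
                  rcases pvHead123 t with h' | h' | h' | h' <;> rw [h'] at hhd <;> simp_all
                have e5 : pvR5 (c :: pvR4 (pvR3 (pvR2 (pvR1 t)))) =
                    c :: pvR5 (pvR4 (pvR3 (pvR2 (pvR1 t)))) := by
                  rw [pvR5, pvRepl]
                  rw [if_neg]
                  intro hm
                  obtain ⟨hc, _⟩ := List.cons_prefix_cons.mp
                    ((PySem.Chars.startswith_iff _ _).mp hm)
                  subst hc
                  exact h5 (by simp [List.isPrefixOf])
                rw [e1, e2, e3, e4, e5, hih, hs]

theorem pvR1_eq (x : List Char) : pvRepl ['t','r','u','e'] ['T','r','u','e'] x = pvR1 x := rfl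
theorem pvR2_eq (x : List Char) : pvRepl ['f','a','l','s','e'] ['F','a','l','s','e'] x = pvR2 x := rfl
theorem pvR3_eq (x : List Char) : pvRepl ['&','&'] [' ','a','n','d',' '] x = pvR3 x := rfl
theorem pvR4_eq (x : List Char) : pvRepl ['|','|'] [' ','o','r',' '] x = pvR4 x := rfl
theorem pvR5_eq (x : List Char) : pvRepl ['!'] [' ','n','o','t',' '] x = pvR5 x := rfl

theorem pvMain (x : List Char) :
    pvR5 (pvR4 (pvR3 (pvR2 (pvR1 x)))) = pvScanB x :=
  pvMainAux x.length x (le_refl _)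

-- ===== VERDICT (by name: the statement is the Claim_ definition above) =====
set_option maxHeartbeats 2000000 in
theorem compile_krass_conditional_spec : Claim_equal_compile_krass_conditional := by
  intro s _
  unfold Spec_compile_krass_conditional compile_krass_conditional_alt
  have hA : compile_krass_conditional s =
      PySem.Str.replace (PySem.Str.replace (PySem.Str.replace (PySem.Str.replace
        (PySem.Str.replace s "true" "True") "false" "False") "&&" " and ") "||" " or ")
        "!" " not " := rfl
  rw [hA, PySem.Str.replace]
  refine congrArg String.ofList ?_
  simp only [PySem.Str.toList_replace]
  rw [show ("true".toList) = ['t','r','u','e'] from by decide,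
    show ("True".toList) = ['T','r','u','e'] from by decide,
    show ("false".toList) = ['f','a','l','s','e'] from by decide,
    show ("False".toList) = ['F','a','l','s','e'] from by decide,
    show ("&&".toList) = ['&','&'] from by decide,
    show (" and ".toList) = [' ','a','n','d',' '] from by decide,
    show ("||".toList) = ['|','|'] from by decide,
    show (" or ".toList) = [' ','o','r',' '] from by decide,
    show ("!".toList) = ['!'] from by decide,
    show (" not ".toList) = [' ','n','o','t',' '] from by decide]
  rw [pvReplace_eq_repl _ _ _ (by decide), pvReplace_eq_repl _ _ _ (by decide),
    pvReplace_eq_repl _ _ _ (by decide), pvReplace_eq_repl _ _ _ (by decide),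
    pvReplace_eq_repl _ _ _ (by decide)]
  rw [pvR1_eq, pvR2_eq, pvR3_eq, pvR4_eq, pvR5_eq]
  exact pvMain s.toList
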